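-- pv_equiv track=rewrite | github.com/caringalhipe/cs199aclthesis | poset_utils.py | binaryToCover
-- ===== SOURCE A (Python) =====
-- def binaryToCover(P, n):
--     coverRelations = []
--     for (u, v) in P:
--         if (u, v) in coverRelations:
--             continue
--         if len(coverRelations) == n - 1:
--             break
--         transitive = False
--         for w in range(1, n + 1):
--             if w == u or w == v:
--                 continue
--             else:
--                 if (u, w) in P and (w, v) in P:
--                     transitive = True
--                     break
--         if not transitive:
--             coverRelations.append((u, v))
--     return sorted(coverRelations)
-- ===== SOURCE B (Python) =====
-- def binaryToCover(P, n):
--     succ = {}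
--     pred = {}
--     for (u, v) in P:
--         succ.setdefault(u, set()).add(v)
--         pred.setdefault(v, set()).add(u)
--     cover = []
--     seen = set()
--     for (u, v) in P:
--         if (u, v) in seen:
--             continue
--         if len(cover) == n - 1:
--             break
--         mids = succ.get(u, set()) & pred.get(v, set())
--         if not any(w != u and w != v and 1 <= w <= n for w in mids):
--             cover.append((u, v))
--             seen.add((u, v))
--     return sorted(cover)
-- ===== Notes on version B (the rewrite author's own statement) =====
-- stated objective: faster
-- what changed: B precomputes successor/predecessor sets in one pass over P and decides each pair's transitivity by intersecting them (O(1)-membership sets also replace the list scans for duplicates), instead of A's linear 'in P' scans inside the w-loop for every pair.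
import Mathlib
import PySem

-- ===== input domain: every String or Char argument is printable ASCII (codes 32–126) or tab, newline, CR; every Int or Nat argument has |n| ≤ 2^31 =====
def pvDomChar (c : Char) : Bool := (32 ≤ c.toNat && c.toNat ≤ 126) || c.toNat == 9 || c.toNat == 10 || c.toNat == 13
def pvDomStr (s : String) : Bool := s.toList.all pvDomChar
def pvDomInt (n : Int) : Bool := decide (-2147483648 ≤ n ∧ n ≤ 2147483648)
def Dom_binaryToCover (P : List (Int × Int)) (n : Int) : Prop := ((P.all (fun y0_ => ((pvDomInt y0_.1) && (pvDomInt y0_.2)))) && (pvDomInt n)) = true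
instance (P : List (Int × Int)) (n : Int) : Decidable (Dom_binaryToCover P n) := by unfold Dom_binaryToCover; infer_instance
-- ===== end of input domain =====

-- B replaces A's linear 'in P' scans inside the w-loop by precomputed successor/predecessor
-- sets intersected per pair (objective: faster, asymptotic).

-- ===== PORT A =====
def binaryToCoverGoA (P : List (Int × Int)) (n : Int) :
    List (Int × Int) → List (Int × Int) → List (Int × Int)
  | [], cover => cover
  | (u, v) :: rest, cover =>
    if (u, v) ∈ cover then binaryToCoverGoA P n rest cover
    else if (cover.length : Int) = n - 1 then cover
    else
      if (PySem.List.pyRange 1 (n + 1) 1).any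
          (fun w => !(w == u || w == v) && (P.contains (u, w) && P.contains (w, v))) then
        binaryToCoverGoA P n rest cover
      else
        binaryToCoverGoA P n rest (cover ++ [(u, v)])

def binaryToCover (P : List (Int × Int)) (n : Int) : List (Int × Int) :=
  PySem.List.sorted2 (binaryToCoverGoA P n P []) (·.1) (·.2) false

-- ===== PORT B =====
def binaryToCoverSucc (P : List (Int × Int)) : PySem.Dict Int (PySem.Set Int) :=
  P.foldl (fun d p => d.modify p.1 PySem.Set.empty (fun s => PySem.Set.add s p.2)) PySem.Dict.empty

def binaryToCoverPred (P : List (Int × Int)) : PySem.Dict Int (PySem.Set Int) :=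
  P.foldl (fun d p => d.modify p.2 PySem.Set.empty (fun s => PySem.Set.add s p.1)) PySem.Dict.empty

def binaryToCoverGoB (succ pred : PySem.Dict Int (PySem.Set Int)) (n : Int) :
    List (Int × Int) → List (Int × Int) → PySem.Set (Int × Int) → List (Int × Int)
  | [], cover, _ => cover
  | (u, v) :: rest, cover, seen =>
    if (u, v) ∈ seen then binaryToCoverGoB succ pred n rest cover seen
    else if (cover.length : Int) = n - 1 then cover
    else
      if (PySem.Set.inter (succ.getD u PySem.Set.empty) (pred.getD v PySem.Set.empty)).any
          (fun w => w != u && w != v && (decide (1 ≤ w) && decide (w ≤ n))) then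
        binaryToCoverGoB succ pred n rest cover seen
      else
        binaryToCoverGoB succ pred n rest (cover ++ [(u, v)]) (PySem.Set.add seen (u, v))

def binaryToCover_alt (P : List (Int × Int)) (n : Int) : List (Int × Int) :=
  PySem.List.sorted2
    (binaryToCoverGoB (binaryToCoverSucc P) (binaryToCoverPred P) n P [] PySem.Set.empty)
    (·.1) (·.2) false

-- ===== PRECONDITION & SPEC =====
def Spec_binaryToCover (P : List (Int × Int)) (n : Int) (out : List (Int × Int)) : Prop := out = binaryToCover_alt P n
instance (P : List (Int × Int)) (n : Int) (out : List (Int × Int)) : Decidable (Spec_binaryToCover P n out) := by unfold Spec_binaryToCover; infer_instance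

-- ===== CLAIM (what is proved, stated in full; the proofs are below) =====
def Claim_equal_binaryToCover : Prop := ∀ (P : List (Int × Int)) (n : Int), Dom_binaryToCover P n → Spec_binaryToCover P n (binaryToCover P n)

-- ===== LEMMAS AND PROOFS =====

-- membership in the accumulated successor dict
lemma mem_getD_foldl_modify_add (P : List (Int × Int)) (f g : Int × Int → Int)
    (d : PySem.Dict Int (PySem.Set Int)) (u w : Int) :
    w ∈ (P.foldl (fun d p => d.modify (f p) PySem.Set.empty (fun s => PySem.Set.add s (g p))) d).getD u PySem.Set.empty
      ↔ w ∈ d.getD u PySem.Set.empty ∨ ∃ p ∈ P, f p = u ∧ g p = w := by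
  induction P generalizing d with
  | nil => simp
  | cons q rest ih =>
    simp only [List.foldl_cons, ih, PySem.Dict.getD_modify, List.mem_cons]
    by_cases h : u = f q
    · subst h; simp [PySem.Set.mem_add]; tauto
    · simp [if_neg h]; tauto

lemma mem_getD_succ (P : List (Int × Int)) (u w : Int) :
    w ∈ (binaryToCoverSucc P).getD u PySem.Set.empty ↔ (u, w) ∈ P := by
  unfold binaryToCoverSucc
  rw [mem_getD_foldl_modify_add P (·.1) (·.2)]
  simp [PySem.Dict.getD_empty]

lemma mem_getD_pred (P : List (Int × Int)) (v w : Int) :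
    w ∈ (binaryToCoverPred P).getD v PySem.Set.empty ↔ (w, v) ∈ P := by
  unfold binaryToCoverPred
  rw [mem_getD_foldl_modify_add P (·.2) (·.1)]
  simp [PySem.Dict.getD_empty]

-- the two transitivity tests agree
lemma transTest_eq (P : List (Int × Int)) (n u v : Int) :
    ((PySem.List.pyRange 1 (n + 1) 1).any
        (fun w => !(w == u || w == v) && (P.contains (u, w) && P.contains (w, v))))
      = ((PySem.Set.inter ((binaryToCoverSucc P).getD u PySem.Set.empty)
            ((binaryToCoverPred P).getD v PySem.Set.empty)).any
          (fun w => w != u && w != v && (decide (1 ≤ w) && decide (w ≤ n)))) := by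
  rw [Bool.eq_iff_iff]
  simp only [List.any_eq_true, PySem.List.mem_pyRange_one, PySem.Set.mem_inter,
    mem_getD_succ, mem_getD_pred, Bool.and_eq_true, Bool.not_eq_eq_eq_not, Bool.not_true,
    bne_iff_ne, decide_eq_true_eq, beq_eq_false_iff_ne,
    List.contains_eq_mem, Bool.not_or]
  constructor
  · rintro ⟨w, ⟨h1, h2⟩, ⟨hu, hv⟩, hp, hq⟩
    exact ⟨w, ⟨hp, hq⟩, ⟨hu, hv⟩, h1, by omega⟩
  · rintro ⟨w, ⟨hp, hq⟩, ⟨hu, hv⟩, h1, h2⟩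
    exact ⟨w, ⟨h1, by omega⟩, ⟨hu, hv⟩, hp, hq⟩

-- lockstep loop equivalence
lemma go_eq (P : List (Int × Int)) (n : Int) :
    ∀ (rest cover : List (Int × Int)) (seen : PySem.Set (Int × Int)),
      (∀ x, x ∈ seen ↔ x ∈ cover) →
      binaryToCoverGoA P n rest cover
        = binaryToCoverGoB (binaryToCoverSucc P) (binaryToCoverPred P) n rest cover seen := by
  intro rest
  induction rest with
  | nil => intro cover seen _; rfl
  | cons p rest ih =>
    rintro cover seen hinv
    obtain ⟨u, v⟩ := p
    simp only [binaryToCoverGoA, binaryToCoverGoB]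
    by_cases hmem : (u, v) ∈ cover
    · rw [if_pos hmem, if_pos ((hinv (u, v)).mpr hmem)]
      exact ih cover seen hinv
    · rw [if_neg hmem, if_neg (fun h => hmem ((hinv (u, v)).mp h))]
      by_cases hlen : (cover.length : Int) = n - 1
      · rw [if_pos hlen, if_pos hlen]
      · rw [if_neg hlen, if_neg hlen, transTest_eq P n u v]
        by_cases htr : ((PySem.Set.inter ((binaryToCoverSucc P).getD u PySem.Set.empty)
            ((binaryToCoverPred P).getD v PySem.Set.empty)).any
            (fun w => w != u && w != v && (decide (1 ≤ w) && decide (w ≤ n)))) = true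
        · rw [if_pos htr, if_pos htr]
          exact ih cover seen hinv
        · rw [if_neg htr, if_neg htr]
          apply ih
          intro x
          rw [PySem.Set.mem_add, hinv x]
          simp
-- ===== VERDICT (by name: the statement is the Claim_ definition above) =====
theorem binaryToCover_spec : Claim_equal_binaryToCover := by
  intro P n _
  unfold Spec_binaryToCover binaryToCover binaryToCover_alt
  rw [go_eq P n P [] PySem.Set.empty (by simp [PySem.Set.empty])]
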